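-- pv_equiv track=rewrite | github.com/pypi-data/pypi-mirror-91 | packages/nlu/nlu-1.1.0rc1.tar.gz/nlu-1.1.0rc1/tmp/doc_generation/generate_scala_pipe_code.py | parse_py_pipe_to_pieces
-- ===== SOURCE A (Python) =====
-- def parse_py_pipe_to_pieces(py_code):
--     #segment py code into parts
--     # 1. imports (beginning until first '=' is imports
--     # 2. pipe definition
--     # 3. suffix
--     # 4. and classifies wether it is a pretrained pipeline or Model stack
--     import_code = []
--     pipe_code = []
--     suffix_code = []
--     code_type = ''
--     on_imports = True
--     on_pipe = False
--     for l in  py_code.split('\n'):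
--         if '=' in l  and (on_pipe or on_imports):
--             on_imports = False
--             on_pipe = True
--         if 'text =' in l : #if true then we are in suffix
--             on_pipe, on_imports = False, False
--         if on_imports : import_code.append(l)
--         if on_pipe : pipe_code.append(l)
--         if not on_imports and not on_pipe : suffix_code.append(l)
--
--     return import_code, pipe_code, suffix_code, code_type
-- ===== SOURCE B (Python) =====
-- def parse_py_pipe_to_pieces(py_code):
--     # Boundary-based rewrite: find the two split points, then slice.
--     lines = py_code.split('\n')
--     n = len(lines)
--     p = next((i for i, l in enumerate(lines) if '=' in l), n)
--     t = next((i for i, l in enumerate(lines) if 'text =' in l), n)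
--     return lines[:p], lines[p:t], lines[t:], ''
-- ===== Notes on version B (the rewrite author's own statement) =====
-- stated objective: simpler
-- what changed: Replaced A's per-line two-flag state machine with computing two boundary indices (first line containing '=', first line containing 'text =') and returning three slices of the line list.
import Mathlib
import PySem

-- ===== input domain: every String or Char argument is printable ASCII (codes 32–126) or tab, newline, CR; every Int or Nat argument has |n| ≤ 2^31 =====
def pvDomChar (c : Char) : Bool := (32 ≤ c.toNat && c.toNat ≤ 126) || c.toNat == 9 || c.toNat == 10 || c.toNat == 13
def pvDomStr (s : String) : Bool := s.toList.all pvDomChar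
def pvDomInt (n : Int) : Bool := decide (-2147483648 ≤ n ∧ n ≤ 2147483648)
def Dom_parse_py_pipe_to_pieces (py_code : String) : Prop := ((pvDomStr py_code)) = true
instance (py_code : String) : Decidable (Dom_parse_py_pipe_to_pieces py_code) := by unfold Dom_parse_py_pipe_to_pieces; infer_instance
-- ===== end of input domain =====

-- B replaces A's per-line two-flag state machine by computing the two boundary
-- indices (first '=' line, first 'text =' line) and slicing; objective: simpler.

-- ===== PORT A =====
-- shared primitive for Python's `'=' in l` / `'text =' in l`
def pvHasEq (l : String) : Bool := PySem.Str.isIn "=" l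
def pvHasText (l : String) : Bool := PySem.Str.isIn "text =" l

-- one iteration of A's for-loop over its state (imports, pipe, suffix, on_imports, on_pipe)
def pvStepA (st : List String × List String × List String × Bool × Bool) (l : String) :
    List String × List String × List String × Bool × Bool :=
  match st with
  | (imp, pip, suf, oi, op) =>
    let b1 := pvHasEq l && (op || oi)
    let oi1 := if b1 then false else oi
    let op1 := if b1 then true else op
    let oi2 := if pvHasText l then false else oi1
    let op2 := if pvHasText l then false else op1
    (if oi2 then imp ++ [l] else imp,
     if op2 then pip ++ [l] else pip,
     if !oi2 && !op2 then suf ++ [l] else suf,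
     oi2, op2)

def parse_py_pipe_to_pieces (py_code : String) : List String × List String × List String × String :=
  match ((PySem.Str.split? py_code "\n").getD []).foldl pvStepA ([], [], [], true, false) with
  | (imp, pip, suf, _, _) => (imp, pip, suf, "")

-- ===== PORT B =====
def parse_py_pipe_to_pieces_alt (py_code : String) : List String × List String × List String × String :=
  let lines := (PySem.Str.split? py_code "\n").getD []
  let p := lines.findIdx pvHasEq
  let t := lines.findIdx pvHasText
  (lines.take p, (lines.drop p).take (t - p), lines.drop t, "")

-- ===== PRECONDITION & SPEC =====
def Spec_parse_py_pipe_to_pieces (py_code : String) (out : List String × List String × List String × String) : Prop := out = parse_py_pipe_to_pieces_alt py_code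
instance (py_code : String) (out : List String × List String × List String × String) : Decidable (Spec_parse_py_pipe_to_pieces py_code out) := by unfold Spec_parse_py_pipe_to_pieces; infer_instance

-- ===== CLAIM (what is proved, stated in full; the proofs are below) =====
def Claim_equal_parse_py_pipe_to_pieces : Prop := ∀ (py_code : String), Dom_parse_py_pipe_to_pieces py_code → Spec_parse_py_pipe_to_pieces py_code (parse_py_pipe_to_pieces py_code)

-- ===== LEMMAS AND PROOFS =====

-- a line containing "text =" contains "="
lemma pvText_imp_eq (l : String) (h : pvHasText l = true) : pvHasEq l = true := by
  simp only [pvHasText, pvHasEq, PySem.Str.isIn_eq] at h ⊢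
  rw [PySem.Chars.isIn_iff_infix] at h ⊢
  exact List.IsInfix.trans (by decide) h

-- once both flags are off, every remaining line goes to suffix
lemma pvFold_suffix (ls : List String) : ∀ imp pip suf,
    ls.foldl pvStepA (imp, pip, suf, false, false) = (imp, pip, suf ++ ls, false, false) := by
  induction ls with
  | nil => intro imp pip suf; simp
  | cons l ls ih =>
    intro imp pip suf
    simp only [List.foldl_cons, pvStepA]
    cases h : pvHasText l <;> simp [ih]

-- in pipe state, lines go to pipe until the first "text =" line, then to suffix
lemma pvFold_pipe (ls : List String) : ∀ imp pip suf,
    ls.foldl pvStepA (imp, pip, suf, false, true) =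
      (imp, pip ++ ls.take (ls.findIdx pvHasText), suf ++ ls.drop (ls.findIdx pvHasText),
       false, !ls.any pvHasText) := by
  induction ls with
  | nil => intro imp pip suf; simp
  | cons l ls ih =>
    intro imp pip suf
    simp only [List.foldl_cons, pvStepA]
    cases h : pvHasText l with
    | true =>
      simp only [h, List.findIdx_cons, List.any_cons]
      cases hE : pvHasEq l <;>
        simp [pvFold_suffix]
    | false =>
      simp only [h, List.findIdx_cons, List.any_cons]
      cases hE : pvHasEq l <;>
        simp [ih, List.take_succ_cons, List.drop_succ_cons]

-- from the initial imports state the fold produces exactly B's three slices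
lemma pvFold_imports (ls : List String) : ∀ imp pip suf,
    ls.foldl pvStepA (imp, pip, suf, true, false) =
      (imp ++ ls.take (ls.findIdx pvHasEq),
       pip ++ (ls.drop (ls.findIdx pvHasEq)).take (ls.findIdx pvHasText - ls.findIdx pvHasEq),
       suf ++ ls.drop (ls.findIdx pvHasText),
       !ls.any pvHasEq, ls.any pvHasEq && !ls.any pvHasText) := by
  induction ls with
  | nil => intro imp pip suf; simp
  | cons l ls ih =>
    intro imp pip suf
    simp only [List.foldl_cons, pvStepA]
    cases hT : pvHasText l with
    | true =>
      have hE := pvText_imp_eq l hT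
      simp [hT, hE, pvFold_suffix, List.findIdx_cons]
    | false =>
      cases hE : pvHasEq l with
      | true =>
        simp [hT, hE, pvFold_pipe, List.findIdx_cons]
      | false =>
        simp [hT, hE, ih, List.findIdx_cons,
          List.take_succ_cons, List.drop_succ_cons, Nat.succ_sub_succ]

-- ===== VERDICT (by name: the statement is the Claim_ definition above) =====
theorem parse_py_pipe_to_pieces_spec : Claim_equal_parse_py_pipe_to_pieces := by
  intro py_code _
  unfold Spec_parse_py_pipe_to_pieces parse_py_pipe_to_pieces parse_py_pipe_to_pieces_alt
  rw [pvFold_imports]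
  simp
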